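-- pv_equiv track=rewrite | github.com/kh277/BOJ | 백준/Silver/6948. Subsets/Subsets.py | solve
-- ===== SOURCE A (Python) =====
-- def solve(N, dic):
--     result = dict()
--     for key in sorted(dic.keys()):
--         visited = set()
--         subset = set()
--         stack = [key]
--         visited.add(key)
--
--         # 각 키별로 DFS 탐색
--         while stack:
--             cur = stack.pop()
--
--             # 소문자일 경우
--             if 97 <= ord(cur) <= 122:
--                 subset.add(cur)
--             # 대문자일 경우
--             else:
--                 visited.add(cur)
--                 for i in dic[cur]:
--                     if i not in visited:
--                         stack.append(i)
--         result[key] = subset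
--
--     return result
-- ===== SOURCE B (Python) =====
-- def solve(N, dic):
--     result = {}
--     for key in sorted(dic):
--         visited = {key}
--         subset = set()
--
--         def dfs(cur):
--             if 'a' <= cur <= 'z':
--                 subset.add(cur)
--                 return
--             for nb in dic[cur]:
--                 if nb not in visited:
--                     visited.add(nb)
--                     dfs(nb)
--
--         dfs(key)
--         result[key] = subset
--     return result
-- ===== Notes on version B (the rewrite author's own statement) =====
-- stated objective: alternative
-- what changed: Replaces A's per-key explicit-stack worklist DFS (nodes marked visited only when popped, so duplicates can enter the stack and visited nodes are re-expanded) by a nested recursive DFS helper that marks each neighbour visited at discovery and recurses into it immediately.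
import Mathlib
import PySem

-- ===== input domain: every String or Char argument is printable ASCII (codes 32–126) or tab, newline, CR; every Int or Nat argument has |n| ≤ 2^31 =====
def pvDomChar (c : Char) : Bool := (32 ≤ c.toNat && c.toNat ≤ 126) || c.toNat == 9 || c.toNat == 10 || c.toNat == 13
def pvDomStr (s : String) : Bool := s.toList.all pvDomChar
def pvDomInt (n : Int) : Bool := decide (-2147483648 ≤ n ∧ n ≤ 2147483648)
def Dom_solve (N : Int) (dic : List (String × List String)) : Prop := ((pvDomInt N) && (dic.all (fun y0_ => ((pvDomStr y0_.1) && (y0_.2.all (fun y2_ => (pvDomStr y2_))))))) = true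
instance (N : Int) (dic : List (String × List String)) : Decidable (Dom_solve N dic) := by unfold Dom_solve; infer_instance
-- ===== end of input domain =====

-- B replaces A's per-key explicit-stack DFS (visited marked at pop) by a recursive DFS helper that
-- marks nodes when first discovered; same reachable-lowercase sets, different traversal discipline.
-- In both ports each result set (a Python `set`, order-free) is emitted as its sorted element list.

-- ===== PORT A =====
-- `ord(s)`: code point of a length-1 string; `none` is exactly Python's TypeError (PySem has no ord). Exact.
def pyOrd? (s : String) : Option Nat :=
  match s.toList with
  | [c] => some c.toNat
  | _ => none

-- all strings occurring in the dict (termination measure universe only)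
def UFin (d : PySem.Dict String (List String)) : Finset String :=
  (d.keys ++ d.values.flatten).toFinset

def wA (d : PySem.Dict String (List String)) (vis : PySem.Set String) (s : String) : Nat :=
  if s ∈ vis then 1 + (d.getD s []).length else 1

def loopA (d : PySem.Dict String (List String)) (vis sub : PySem.Set String)
    (stack : List String) : PySem.Set String :=
  match stack with
  | [] => sub
  | cur :: rest =>
    match h : pyOrd? cur with
    | none => sub        -- ord(cur) raises TypeError: outside Pre_solve
    | some o =>
      if 97 ≤ o ∧ o ≤ 122 then
        loopA d vis (PySem.Set.add sub cur) rest
      else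
        -- visited.add(cur); the updated visited set is written out inline below
        match hgg : d.get? cur with
        | none => sub    -- dic[cur] raises KeyError: outside Pre_solve
        | some nbs =>
          loopA d (PySem.Set.add vis cur) sub
            ((nbs.filter (fun i => !(PySem.Set.contains (PySem.Set.add vis cur) i))).reverse ++ rest)
termination_by (((UFin d) \ vis.toFinset).card, (stack.map (wA d vis)).sum)
decreasing_by
  · apply Prod.Lex.right
    have : 1 ≤ wA d vis cur := by simp [wA]; split <;> omega
    simp only [List.map_cons, List.sum_cons]
    omega
  · by_cases hm : cur ∈ vis
    · have hv : PySem.Set.add vis cur = vis := PySem.Set.add_of_mem hm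
      rw [hv]
      apply Prod.Lex.right
      have hone : ∀ x ∈ nbs.filter (fun i => !(PySem.Set.contains vis i)), wA d vis x = 1 := by
        intro x hx
        have hx2 := (List.mem_filter.1 hx).2
        have hxv : x ∉ vis := by simpa using hx2
        simp [wA, hxv]
      have hA : ((nbs.filter (fun i => !(PySem.Set.contains vis i))).map (wA d vis)).sum
          ≤ nbs.length := by
        rw [List.map_congr_left hone]
        simpa using List.length_filter_le _ nbs
      have hw : wA d vis cur = 1 + nbs.length := by
        simp [wA, hm, PySem.Dict.getD_eq_get?_getD, hgg]
      simp only [List.map_append, List.sum_append, List.map_reverse, List.sum_reverse,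
        List.map_cons, List.sum_cons]
      omega
    · apply Prod.Lex.left
      have hv : PySem.Set.add vis cur = vis ++ [cur] := PySem.Set.add_of_not_mem hm
      rw [hv]
      apply Finset.card_lt_card
      constructor
      · intro x hx
        simp only [Finset.mem_sdiff, List.mem_toFinset, List.mem_append] at *
        exact ⟨hx.1, fun hxv => hx.2 (Or.inl hxv)⟩
      · intro hsub
        have hcur : cur ∈ UFin d := by
          simp only [UFin, List.mem_toFinset, List.mem_append]
          exact Or.inl (PySem.Dict.mem_keys_of_mem_items d (PySem.Dict.mem_items_of_get?_eq_some d hgg))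
        have h1 : cur ∈ UFin d \ vis.toFinset := by
          simp only [Finset.mem_sdiff, List.mem_toFinset]
          exact ⟨hcur, hm⟩
        simpa using hsub h1

def solve (N : Int) (dic : List (String × List String)) : List (String × List String) :=
  let d := PySem.Dict.ofList dic
  ((PySem.List.sorted d.keys id).foldl
    (fun res key =>
      res.insert key
        (PySem.List.sorted (loopA d (PySem.Set.add PySem.Set.empty key) PySem.Set.empty [key]) id))
    PySem.Dict.empty).items

-- ===== PORT B =====
lemma getD_subset_UFin (d : PySem.Dict String (List String)) (cur : String) :
    ∀ x ∈ d.getD cur [], x ∈ UFin d := by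
  intro x hx
  rw [PySem.Dict.getD_eq_get?_getD] at hx
  cases hg : d.get? cur with
  | none => rw [hg] at hx; simp at hx
  | some vs =>
    rw [hg] at hx
    simp only [Option.getD_some] at hx
    have hit := PySem.Dict.mem_items_of_get?_eq_some d hg
    have hvv : vs ∈ d.values := by
      simp only [PySem.Dict.values]
      exact List.mem_map_of_mem hit
    simp only [UFin, List.mem_toFinset, List.mem_append]
    exact Or.inr (List.mem_flatten.2 ⟨vs, hvv, hx⟩)

mutual
def dfsB (d : PySem.Dict String (List String)) (cur : String)
    (vis sub : PySem.Set String) :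
    {p : PySem.Set String × PySem.Set String // ∀ x ∈ vis, x ∈ p.1} :=
  if decide ("a" ≤ cur ∧ cur ≤ "z") then
    ⟨(vis, PySem.Set.add sub cur), fun _ hx => hx⟩
  else
    goB d (d.getD cur []) (getD_subset_UFin d cur) vis sub
termination_by (((UFin d) \ vis.toFinset).card, (d.getD cur []).length + 1)
decreasing_by
  apply Prod.Lex.right
  omega

def goB (d : PySem.Dict String (List String)) (l : List String)
    (hl : ∀ x ∈ l, x ∈ UFin d) (vis sub : PySem.Set String) :
    {p : PySem.Set String × PySem.Set String // ∀ x ∈ vis, x ∈ p.1} :=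
  match l, hl with
  | [], _ => ⟨(vis, sub), fun _ hx => hx⟩
  | nb :: rest, hl =>
    if hc : PySem.Set.contains vis nb then
      goB d rest (fun x hx => hl x (List.mem_cons_of_mem nb hx)) vis sub
    else
      let r := dfsB d nb (PySem.Set.add vis nb) sub
      let q := goB d rest (fun x hx => hl x (List.mem_cons_of_mem nb hx)) r.val.1 r.val.2
      ⟨q.val, fun x hx => q.prop x (r.prop x ((PySem.Set.mem_add vis nb x).2 (Or.inl hx)))⟩
termination_by (((UFin d) \ vis.toFinset).card, l.length)
decreasing_by
  · apply Prod.Lex.right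
    simp
  · apply Prod.Lex.left
    have hnb : nb ∉ vis := by
      intro hin
      exact hc ((PySem.Set.contains_iff vis nb).2 hin)
    have hv : PySem.Set.add vis nb = vis ++ [nb] := PySem.Set.add_of_not_mem hnb
    rw [hv]
    apply Finset.card_lt_card
    constructor
    · intro x hx
      simp only [Finset.mem_sdiff, List.mem_toFinset, List.mem_append] at *
      exact ⟨hx.1, fun hxv => hx.2 (Or.inl hxv)⟩
    · intro hsub
      have h1 : nb ∈ UFin d \ vis.toFinset := by
        simp only [Finset.mem_sdiff, List.mem_toFinset]
        exact ⟨hl nb (List.mem_cons_self), hnb⟩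
      simpa using hsub h1
  · apply Prod.Lex.left
    have hnb : nb ∉ vis := by
      intro hin
      exact hc ((PySem.Set.contains_iff vis nb).2 hin)
    apply Finset.card_lt_card
    constructor
    · intro x hx
      simp only [Finset.mem_sdiff, List.mem_toFinset] at *
      refine ⟨hx.1, fun hxv => hx.2 ?_⟩
      exact r.prop x ((PySem.Set.mem_add vis nb x).2 (Or.inl hxv))
    · intro hsub
      have h1 : nb ∈ UFin d \ vis.toFinset := by
        simp only [Finset.mem_sdiff, List.mem_toFinset]
        exact ⟨hl nb (List.mem_cons_self), hnb⟩
      have h2 := hsub h1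
      simp only [Finset.mem_sdiff, List.mem_toFinset] at h2
      exact h2.2 (r.prop nb ((PySem.Set.mem_add vis nb nb).2 (Or.inr rfl)))
end

def solve_alt (N : Int) (dic : List (String × List String)) : List (String × List String) :=
  let d := PySem.Dict.ofList dic
  ((PySem.List.sorted d.keys id).foldl
    (fun res key =>
      res.insert key
        (PySem.List.sorted
          (dfsB d key (PySem.Set.add PySem.Set.empty key) PySem.Set.empty).val.2 id))
    PySem.Dict.empty).items


-- ===== PRECONDITION & SPEC =====
-- `isLowA s` is A's test `97 <= ord(s) <= 122` made total (false where ord would raise).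
def isLowA (s : String) : Bool :=
  match pyOrd? s with
  | some o => decide (97 ≤ o ∧ o ≤ 122)
  | none => false

-- Pre_solve holds exactly on the inputs where A raises nothing: every key of the dict is a 1-char
-- string, and every neighbour listed under a non-lowercase key is a 1-char string that is either
-- lowercase or itself a key (otherwise A hits a TypeError in ord() or a KeyError in dic[cur]).
def Pre_solve (N : Int) (dic : List (String × List String)) : Prop :=
  ∀ p ∈ (PySem.Dict.ofList dic).items,
    p.1.toList.length = 1 ∧
    (isLowA p.1 = false →
      ∀ v ∈ p.2, v.toList.length = 1 ∧
        (isLowA v = true ∨ (PySem.Dict.ofList dic).contains v = true))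
instance (N : Int) (dic : List (String × List String)) : Decidable (Pre_solve N dic) := by
  unfold Pre_solve; infer_instance

def pvWitness_solve : Int × (List (String × List String)) := (0, [("A", ["b", "A"]), ("b", [])])

def Spec_solve (N : Int) (dic : List (String × List String)) (out : List (String × List String)) : Prop := out = solve_alt N dic
instance (N : Int) (dic : List (String × List String)) (out : List (String × List String)) : Decidable (Spec_solve N dic out) := by unfold Spec_solve; infer_instance

-- ===== CLAIM (what is proved, stated in full; the proofs are below) =====
def Claim_equal_solve : Prop := ∀ (N : Int) (dic : List (String × List String)), Dom_solve N dic → Pre_solve N dic → Spec_solve N dic (solve N dic)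

-- ===== LEMMAS AND PROOFS =====

-- If s is a single character, B's test "a" <= s <= "z" and A's 97 <= ord(s) <= 122 agree.
lemma low_bridge (s : String) (c : Char) (hs : s.toList = [c]) :
    decide ("a" ≤ s ∧ s ≤ "z") = isLowA s := by
  have hlt : ∀ (t : String) (d : Char), t.toList = [d] → ∀ (u : String) (e : Char), u.toList = [e] →
      (t < u ↔ d < e) := by
    intro t d ht u e hu
    rw [String.lt_iff_toList_lt, ht, hu]
    simp [List.cons_lt_cons_iff]
  have h1 : ("a" ≤ s) ↔ ('a' ≤ c) := by
    rw [← not_lt, ← not_lt, hlt s c hs "a" 'a' rfl]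
  have h2 : (s ≤ "z") ↔ (c ≤ 'z') := by
    rw [← not_lt, ← not_lt, hlt "z" 'z' rfl s c hs]
  have h3 : isLowA s = decide (97 ≤ c.toNat ∧ c.toNat ≤ 122) := by
    simp [isLowA, pyOrd?, hs]
  have h4 : ('a' ≤ c) ↔ 97 ≤ c.toNat := by
    rw [Char.le_def]; constructor <;> (intro h; exact h)
  have h5 : (c ≤ 'z') ↔ c.toNat ≤ 122 := by
    rw [Char.le_def]; constructor <;> (intro h; exact h)
  rw [h3]
  simp [h1, h2, h4, h5]

-- a node the traversals may touch without raising
def OkS (d : PySem.Dict String (List String)) (s : String) : Prop :=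
  s.toList.length = 1 ∧ (isLowA s = false → d.contains s = true)

-- Pre_solve, read on the built dict
def GoodD (d : PySem.Dict String (List String)) : Prop :=
  ∀ p ∈ d.items,
    p.1.toList.length = 1 ∧
    (isLowA p.1 = false →
      ∀ v ∈ p.2, v.toList.length = 1 ∧ (isLowA v = true ∨ d.contains v = true))

-- z is a lowercase node reachable from s along edges that leave non-lowercase nodes,
-- where every node entered on the way avoids vis.
inductive RA (d : PySem.Dict String (List String)) (vis : PySem.Set String) : String → String → Prop
  | base (z : String) : isLowA z = true → RA d vis z z
  | step (s nb z : String) (nbs : List String) :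
      isLowA s = false → d.get? s = some nbs → nb ∈ nbs → nb ∉ vis →
      RA d vis nb z → RA d vis s z

lemma RA_low (d : PySem.Dict String (List String)) (vis : PySem.Set String) {s z : String}
    (hl : isLowA s = true) (h : RA d vis s z) : z = s := by
  cases h with
  | base _ _ => rfl
  | step _ nb _ nbs hlow _ _ _ _ => rw [hl] at hlow; cases hlow

lemma RA_antitone (d : PySem.Dict String (List String)) {vis vis' : PySem.Set String}
    {s z : String} (hsub : ∀ x ∈ vis, x ∈ vis') (h : RA d vis' s z) : RA d vis s z := by
  induction h with
  | base z hz => exact RA.base _ hz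
  | step s nb z nbs hlow hget hmem hnvis _ ih =>
      exact RA.step _ _ _ _ hlow hget hmem (fun hc => hnvis (hsub nb hc)) ih

lemma RA_add_split (d : PySem.Dict String (List String)) (vis : PySem.Set String) (u : String)
    {t z : String} (h : RA d vis t z) :
    RA d (vis.add u) t z ∨ (isLowA u = true ∧ z = u) ∨
      (isLowA u = false ∧ ∃ nbs nb, d.get? u = some nbs ∧ nb ∈ nbs ∧ nb ∉ vis.add u ∧
        RA d (vis.add u) nb z) := by
  induction h with
  | base z hz => exact Or.inl (RA.base _ hz)
  | step s nb z nbs hlow hget hmem hnvis _ ih =>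
      rcases ih with ih | ih | ih
      · by_cases hnb : nb = u
        · subst hnb
          cases ih with
          | base _ hz => exact Or.inr (Or.inl ⟨hz, rfl⟩)
          | step _ nb' _ nbs' hlow' hget' hmem' hnvis' hra' =>
              exact Or.inr (Or.inr ⟨hlow', nbs', nb', hget', hmem', hnvis', hra'⟩)
        · refine Or.inl (RA.step _ _ _ _ hlow hget hmem ?_ ih)
          intro hc
          rcases (PySem.Set.mem_add vis u nb).1 hc with hc | hc
          · exact hnvis hc
          · exact hnb hc
      · exact Or.inr (Or.inl ih)
      · exact Or.inr (Or.inr ih)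

lemma RA_add_self (d : PySem.Dict String (List String)) (vis : PySem.Set String)
    {s z : String} (h : RA d vis s z) : RA d (vis.add s) s z := by
  rcases RA_add_split d vis s h with h1 | h1 | h1
  · exact h1
  · rcases h1 with ⟨hlow, rfl⟩
    exact RA.base _ hlow
  · rcases h1 with ⟨hlow, nbs, nb, hget, hmem, hnmem, hra⟩
    exact RA.step _ _ _ _ hlow hget hmem hnmem hra

lemma good_values (d : PySem.Dict String (List String)) (hg : GoodD d) {s : String}
    {nbs : List String} (h : d.get? s = some nbs) (hlow : isLowA s = false) :
    ∀ v ∈ nbs, OkS d v := by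
  intro v hv
  have hit := PySem.Dict.mem_items_of_get?_eq_some d h
  have h2 := (hg (s, nbs) hit).2 hlow v hv
  refine ⟨h2.1, fun hl => ?_⟩
  rcases h2.2 with h3 | h3
  · rw [hl] at h3; cases h3
  · exact h3

lemma okS_ord (d : PySem.Dict String (List String)) {s : String} (h : OkS d s) :
    ∃ c, s.toList = [c] ∧ pyOrd? s = some c.toNat := by
  rcases List.length_eq_one_iff.1 h.1 with ⟨c, hc⟩
  exact ⟨c, hc, by simp [pyOrd?, hc]⟩

lemma okS_get (d : PySem.Dict String (List String)) {s : String} (h : OkS d s)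
    (hlow : isLowA s = false) : d.get? s = some (d.getD s []) := by
  cases hg : d.get? s with
  | none =>
      have := (PySem.Dict.get?_eq_none_iff_contains d s).1 hg
      rw [h.2 hlow] at this; cases this
  | some vs => simp [PySem.Dict.getD_eq_get?_getD, hg]

lemma loopA_nil (d : PySem.Dict String (List String)) (vis sub : PySem.Set String) :
    loopA d vis sub [] = sub := by rw [loopA]

lemma loopA_cons_low (d : PySem.Dict String (List String)) (vis sub : PySem.Set String)
    (cur : String) (rest : List String) (o : Nat)
    (hord : pyOrd? cur = some o) (hcond : 97 ≤ o ∧ o ≤ 122) :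
    loopA d vis sub (cur :: rest) = loopA d vis (sub.add cur) rest := by
  rw [loopA]
  split
  · next heq => rw [hord] at heq; cases heq
  · next o' heq =>
      rw [hord] at heq
      injection heq with ho
      subst ho
      rw [if_pos hcond]

lemma loopA_cons_expand (d : PySem.Dict String (List String)) (vis sub : PySem.Set String)
    (cur : String) (rest : List String) (o : Nat) (nbs : List String)
    (hord : pyOrd? cur = some o) (hcond : ¬(97 ≤ o ∧ o ≤ 122)) (hget : d.get? cur = some nbs) :
    loopA d vis sub (cur :: rest)
      = loopA d (vis.add cur) sub
          ((nbs.filter (fun i => !((vis.add cur).contains i))).reverse ++ rest) := by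
  rw [loopA]
  split
  · next heq => rw [hord] at heq; cases heq
  · next o' heq =>
      rw [hord] at heq
      injection heq with ho
      subst ho
      rw [if_neg hcond]
      split
      · next heq2 => rw [hget] at heq2; cases heq2
      · next nbs' heq2 =>
          rw [hget] at heq2
          injection heq2 with hn
          subst hn
          rfl

theorem loopA_master (d : PySem.Dict String (List String)) (hg : GoodD d)
    (vis sub : PySem.Set String) (stack : List String) :
    (∀ s ∈ stack, OkS d s) → sub.Nodup →
      (loopA d vis sub stack).Nodup ∧
      (∀ z, z ∈ loopA d vis sub stack ↔ z ∈ sub ∨ ∃ s ∈ stack, RA d vis s z) := by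
  induction vis, sub, stack using loopA.induct d with
  | case1 vis sub =>
      intro _ hnd
      rw [loopA_nil]
      refine ⟨hnd, fun z => ⟨Or.inl, ?_⟩⟩
      rintro (hz | ⟨s, hs, _⟩)
      · exact hz
      · simp at hs
  | case2 vis sub cur rest hord =>
      intro hs _
      rcases okS_ord d (hs cur List.mem_cons_self) with ⟨c, _, hc⟩
      rw [hord] at hc; cases hc
  | case3 vis sub cur rest o hord hcond ih =>
      intro hs hnd
      have heq := loopA_cons_low d vis sub cur rest o hord hcond
      have hlowc : isLowA cur = true := by simp [isLowA, hord]; exact hcond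
      obtain ⟨ihnd, ihiff⟩ := ih (fun s hs' => hs s (List.mem_cons_of_mem _ hs'))
        (PySem.Set.nodup_add _ _ hnd)
      rw [heq]
      refine ⟨ihnd, fun z => ?_⟩
      rw [ihiff z]
      constructor
      · rintro (hz | ⟨s, hs', hra⟩)
        · rcases (PySem.Set.mem_add sub cur z).1 hz with hz | hz
          · exact Or.inl hz
          · rw [hz]
            exact Or.inr ⟨cur, List.mem_cons_self, RA.base _ hlowc⟩
        · exact Or.inr ⟨s, List.mem_cons_of_mem _ hs', hra⟩
      · rintro (hz | ⟨s, hs', hra⟩)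
        · exact Or.inl ((PySem.Set.mem_add sub cur z).2 (Or.inl hz))
        · rcases List.mem_cons.1 hs' with heq' | hs''
          · have hra' : RA d vis cur z := heq' ▸ hra
            rw [RA_low d vis hlowc hra']
            exact Or.inl ((PySem.Set.mem_add sub cur cur).2 (Or.inr rfl))
          · exact Or.inr ⟨s, hs'', hra⟩
  | case4 vis sub cur rest o hord hcond hget =>
      intro hs _
      have hok := hs cur List.mem_cons_self
      have hlowc : isLowA cur = false := by simp [isLowA, hord, hcond]
      rw [okS_get d hok hlowc] at hget
      cases hget
  | case5 vis sub cur rest o hord hcond nbs hget ih =>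
      intro hs hnd
      have hlowc : isLowA cur = false := by simp [isLowA, hord, hcond]
      have heq := loopA_cons_expand d vis sub cur rest o nbs hord hcond hget
      have hsubvis : ∀ x ∈ vis, x ∈ vis.add cur :=
        fun x hx => (PySem.Set.mem_add vis cur x).2 (Or.inl hx)
      have hmemfil : ∀ s, s ∈ (nbs.filter (fun i => !((vis.add cur).contains i))).reverse ↔
          (s ∈ nbs ∧ s ∉ vis.add cur) := by
        intro s
        rw [List.mem_reverse, List.mem_filter]
        constructor
        · rintro ⟨h1, h2⟩
          refine ⟨h1, fun hc => ?_⟩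
          rw [(PySem.Set.contains_iff _ s).2 hc] at h2
          cases h2
        · rintro ⟨h1, h2⟩
          refine ⟨h1, ?_⟩
          cases hcc : (vis.add cur).contains s with
          | false => rfl
          | true => exact absurd ((PySem.Set.contains_iff _ s).1 hcc) h2
      obtain ⟨ihnd, ihiff⟩ := ih
        (by
          intro s hs'
          rcases List.mem_append.1 hs' with hs' | hs'
          · exact good_values d hg hget hlowc s ((hmemfil s).1 hs').1
          · exact hs s (List.mem_cons_of_mem _ hs'))
        hnd
      rw [heq]
      refine ⟨ihnd, fun z => ?_⟩
      rw [ihiff z]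
      constructor
      · rintro (hz | ⟨s, hs', hra⟩)
        · exact Or.inl hz
        · rcases List.mem_append.1 hs' with hs' | hs'
          · rcases (hmemfil s).1 hs' with ⟨h1, h2⟩
            have hsnv : s ∉ vis := fun hc => h2 (hsubvis s hc)
            exact Or.inr ⟨cur, List.mem_cons_self,
              RA.step _ _ _ _ hlowc hget h1 hsnv (RA_antitone d hsubvis hra)⟩
          · exact Or.inr ⟨s, List.mem_cons_of_mem _ hs', RA_antitone d hsubvis hra⟩
      · rintro (hz | ⟨s, hs', hra⟩)
        · exact Or.inl hz
        · rcases RA_add_split d vis cur hra with h1 | h1 | h1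
          · rcases List.mem_cons.1 hs' with heq' | hs''
            · rw [heq'] at h1
              cases h1 with
              | base _ hz => rw [hlowc] at hz; cases hz
              | step _ nb _ nbs1 hlow1 hget1 hmem1 hnm1 hra1 =>
                  rw [hget] at hget1
                  injection hget1 with hnbs
                  subst hnbs
                  exact Or.inr ⟨nb, List.mem_append_left _ ((hmemfil nb).2 ⟨hmem1, hnm1⟩), hra1⟩
            · exact Or.inr ⟨s, List.mem_append_right _ hs'', h1⟩
          · rcases h1 with ⟨hlowu, rfl⟩
            rw [hlowc] at hlowu; cases hlowu
          · rcases h1 with ⟨_, nbs0, nb, hget0, hmem0, hnm0, hra0⟩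
            rw [hget] at hget0
            injection hget0 with hnbs
            subst hnbs
            exact Or.inr ⟨nb, List.mem_append_left _ ((hmemfil nb).2 ⟨hmem0, hnm0⟩), hra0⟩

-- unfold equations for dfsB / goB
lemma dfsB_val_low (d : PySem.Dict String (List String)) (cur : String) (vis sub : PySem.Set String)
    (h : decide ("a" ≤ cur ∧ cur ≤ "z") = true) :
    (dfsB d cur vis sub).val = (vis, PySem.Set.add sub cur) := by
  rw [dfsB]; rw [if_pos h]

lemma dfsB_val_high (d : PySem.Dict String (List String)) (cur : String) (vis sub : PySem.Set String)
    (h : decide ("a" ≤ cur ∧ cur ≤ "z") = false) :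
    (dfsB d cur vis sub).val = (goB d (d.getD cur []) (getD_subset_UFin d cur) vis sub).val := by
  rw [dfsB]
  rw [if_neg (by rw [h]; exact Bool.false_ne_true)]

lemma goB_val_nil (d : PySem.Dict String (List String)) (hl : ∀ x ∈ ([] : List String), x ∈ UFin d)
    (vis sub : PySem.Set String) : (goB d [] hl vis sub).val = (vis, sub) := by
  rw [goB]

lemma goB_val_skip (d : PySem.Dict String (List String)) (nb : String) (rest : List String)
    (hl : ∀ x ∈ nb :: rest, x ∈ UFin d) (vis sub : PySem.Set String)
    (hc : PySem.Set.contains vis nb = true) :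
    (goB d (nb :: rest) hl vis sub).val
      = (goB d rest (fun x hx => hl x (List.mem_cons_of_mem nb hx)) vis sub).val := by
  rw [goB]; rw [dif_pos hc]

lemma goB_val_expl (d : PySem.Dict String (List String)) (nb : String) (rest : List String)
    (hl : ∀ x ∈ nb :: rest, x ∈ UFin d) (vis sub : PySem.Set String)
    (hc : PySem.Set.contains vis nb = false) :
    (goB d (nb :: rest) hl vis sub).val
      = (goB d rest (fun x hx => hl x (List.mem_cons_of_mem nb hx))
          (dfsB d nb (vis.add nb) sub).val.1 (dfsB d nb (vis.add nb) sub).val.2).val := by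
  rw [goB]
  rw [dif_neg (by rw [hc]; exact Bool.false_ne_true)]

-- the joint invariant pack for B's recursive DFS: result-set soundness/completeness
-- w.r.t. RA, absorption, and full exploration of newly marked nodes
abbrev KB (d : PySem.Dict String (List String)) (vis sub : PySem.Set String) (cur : String)
    (p : PySem.Set String × PySem.Set String) : Prop :=
  p.2.Nodup ∧ (∀ x ∈ sub, x ∈ p.2) ∧
  (∀ z ∈ p.2, z ∈ sub ∨ RA d vis cur z) ∧
  (∀ t z, RA d vis t z → z ∈ p.2 ∨ RA d p.1 t z) ∧
  (∀ z, RA d vis cur z → z ∈ p.2) ∧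
  (∀ w ∈ p.1, w ∉ vis → ∀ z, RA d p.1 w z → z ∈ p.2)

abbrev KG (d : PySem.Dict String (List String)) (vis sub : PySem.Set String) (l : List String)
    (p : PySem.Set String × PySem.Set String) : Prop :=
  p.2.Nodup ∧ (∀ x ∈ sub, x ∈ p.2) ∧
  (∀ z ∈ p.2, z ∈ sub ∨ ∃ nb ∈ l, nb ∉ vis ∧ RA d (vis.add nb) nb z) ∧
  (∀ t z, RA d vis t z → z ∈ p.2 ∨ RA d p.1 t z) ∧
  (∀ nb ∈ l, nb ∉ vis → ∀ z, RA d vis nb z → z ∈ p.2) ∧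
  (∀ w ∈ p.1, w ∉ vis → ∀ z, RA d p.1 w z → z ∈ p.2)

theorem dfsB_master (d : PySem.Dict String (List String)) (hg : GoodD d) :
    (∀ (cur : String) (vis sub : PySem.Set String), OkS d cur → sub.Nodup →
      KB d vis sub cur (dfsB d cur vis sub).val) ∧
    (∀ (l : List String) (hl : ∀ x ∈ l, x ∈ UFin d) (vis sub : PySem.Set String),
      (∀ x ∈ l, OkS d x) → sub.Nodup → KG d vis sub l (goB d l hl vis sub).val) := by
  apply dfsB.mutual_induct d
    (motive1 := fun cur vis sub => OkS d cur → sub.Nodup → KB d vis sub cur (dfsB d cur vis sub).val)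
    (motive2 := fun l hl vis sub =>
      (∀ x ∈ l, OkS d x) → sub.Nodup → KG d vis sub l (goB d l hl vis sub).val)
  -- dfsB, lowercase leaf
  · intro cur vis sub hlowB hok hnd
    rcases okS_ord d hok with ⟨c, hcl, _⟩
    have hlowA : isLowA cur = true := by rw [← low_bridge cur c hcl]; exact hlowB
    rw [dfsB_val_low d cur vis sub hlowB]
    refine ⟨PySem.Set.nodup_add _ _ hnd,
      fun x hx => (PySem.Set.mem_add sub cur x).2 (Or.inl hx), ?_, ?_, ?_, ?_⟩
    · intro z hz
      rcases (PySem.Set.mem_add sub cur z).1 hz with hz | hz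
      · exact Or.inl hz
      · rw [hz]; exact Or.inr (RA.base _ hlowA)
    · intro t z hra; exact Or.inr hra
    · intro z hra
      rw [RA_low d vis hlowA hra]
      exact (PySem.Set.mem_add sub cur cur).2 (Or.inr rfl)
    · intro w hw hnw z _; exact absurd hw hnw
  -- dfsB, expand
  · intro cur vis sub hlowB ih hok hnd
    have hd : decide ("a" ≤ cur ∧ cur ≤ "z") = false := Bool.eq_false_iff.2 hlowB
    rcases okS_ord d hok with ⟨c, hcl, _⟩
    have hlowA : isLowA cur = false := by rw [← low_bridge cur c hcl]; exact hd
    have hget : d.get? cur = some (d.getD cur []) := okS_get d hok hlowA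
    have hlok : ∀ x ∈ d.getD cur [], OkS d x := good_values d hg hget hlowA
    obtain ⟨g1, g2, g3, g4, g5, g6⟩ := ih hlok hnd
    rw [dfsB_val_high d cur vis sub hd]
    refine ⟨g1, g2, ?_, g4, ?_, g6⟩
    · intro z hz
      rcases g3 z hz with hz | ⟨nb, hnb, hnv, hra⟩
      · exact Or.inl hz
      · exact Or.inr (RA.step _ _ _ _ hlowA hget hnb hnv
          (RA_antitone d (fun x hx => (PySem.Set.mem_add vis nb x).2 (Or.inl hx)) hra))
    · intro z hra
      cases hra with
      | base _ hl2 => rw [hlowA] at hl2; cases hl2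
      | step _ nb _ nbs hlow hget2 hmem hnv hra2 =>
          rw [hget] at hget2
          injection hget2 with hn
          exact g5 nb (hn ▸ hmem) hnv z hra2
  -- goB, nil
  · intro vis sub hl _ _ hnd
    rw [goB_val_nil]
    exact ⟨hnd, fun x hx => hx, fun z hz => Or.inl hz, fun t z hra => Or.inr hra,
      by intro nb h; simp at h, fun w hw hnw z _ => absurd hw hnw⟩
  -- goB, neighbour already visited
  · intro vis sub nb rest hl hc _ ih hok hnd
    have hnbv : nb ∈ vis := (PySem.Set.contains_iff vis nb).1 hc
    obtain ⟨g1, g2, g3, g4, g5, g6⟩ := ih (fun x hx => hok x (List.mem_cons_of_mem _ hx)) hnd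
    rw [goB_val_skip d nb rest hl vis sub hc]
    refine ⟨g1, g2, ?_, g4, ?_, g6⟩
    · intro z hz
      rcases g3 z hz with hz | ⟨nb2, hnb2, hnv2, hra2⟩
      · exact Or.inl hz
      · exact Or.inr ⟨nb2, List.mem_cons_of_mem _ hnb2, hnv2, hra2⟩
    · intro nb2 hnb2 hnv2 z hra
      rcases List.mem_cons.1 hnb2 with he | hrest
      · exact absurd (he ▸ hnbv) hnv2
      · exact g5 nb2 hrest hnv2 z hra
  -- goB, explore a new neighbour
  · intro vis sub nb rest hl hc hr hl2 ih1 ihq ihq' hok hnd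
    have hnv : nb ∉ vis := fun h => hc ((PySem.Set.contains_iff vis nb).2 h)
    have hcf : PySem.Set.contains vis nb = false := Bool.eq_false_iff.2 hc
    obtain ⟨b1, b2, b3, b4, b5, b6⟩ := ih1 (hok nb List.mem_cons_self) hnd
    obtain ⟨g1, g2, g3, g4, g5, g6⟩ := ihq' (fun x hx => hok x (List.mem_cons_of_mem _ hx)) b1
    rw [goB_val_expl d nb rest hl vis sub hcf]
    have hva : ∀ x ∈ vis, x ∈ vis.add nb :=
      fun x hx => (PySem.Set.mem_add vis nb x).2 (Or.inl hx)
    have hvr : ∀ x ∈ vis.add nb, x ∈ (dfsB d nb (vis.add nb) sub).val.1 :=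
      (dfsB d nb (vis.add nb) sub).prop
    have hvq : ∀ x ∈ (dfsB d nb (vis.add nb) sub).val.1,
        x ∈ (goB d rest (fun x hx => hl x (List.mem_cons_of_mem nb hx))
          (dfsB d nb (vis.add nb) sub).val.1 (dfsB d nb (vis.add nb) sub).val.2).val.1 :=
      (goB d rest (fun x hx => hl x (List.mem_cons_of_mem nb hx))
        (dfsB d nb (vis.add nb) sub).val.1 (dfsB d nb (vis.add nb) sub).val.2).prop
    refine ⟨g1, fun x hx => g2 x (b2 x hx), ?_, ?_, ?_, ?_⟩
    · -- soundness
      intro z hz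
      rcases g3 z hz with hz2 | ⟨nb2, hnb2, hnv2, hra2⟩
      · rcases b3 z hz2 with hz3 | hra3
        · exact Or.inl hz3
        · exact Or.inr ⟨nb, List.mem_cons_self, hnv, hra3⟩
      · refine Or.inr ⟨nb2, List.mem_cons_of_mem _ hnb2,
          fun h => hnv2 (hvr nb2 (hva nb2 h)), RA_antitone d ?_ hra2⟩
        intro x hx
        rcases (PySem.Set.mem_add vis nb2 x).1 hx with hx | hx
        · exact (PySem.Set.mem_add _ nb2 x).2 (Or.inl (hvr x (hva x hx)))
        · exact (PySem.Set.mem_add _ nb2 x).2 (Or.inr hx)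
    · -- absorption
      intro t z hra
      rcases RA_add_split d vis nb hra with h1 | h1 | h1
      · rcases b4 t z h1 with hz | hra2
        · exact Or.inl (g2 z hz)
        · exact g4 t z hra2
      · rcases h1 with ⟨hlowu, rfl⟩
        exact Or.inl (g2 _ (b5 _ (RA.base _ hlowu)))
      · rcases h1 with ⟨hlowu, nbs, nb2, hget2, hmem2, hnm2, hra2⟩
        exact Or.inl (g2 z (b5 z (RA.step _ _ _ _ hlowu hget2 hmem2 hnm2 hra2)))
    · -- completeness
      intro nb2 hnb2 hnv2 z hra
      rcases List.mem_cons.1 hnb2 with he | hrest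
      · exact g2 z (b5 z (RA_add_self d vis (he ▸ hra)))
      · rcases RA_add_split d vis nb hra with h1 | h1 | h1
        · rcases b4 nb2 z h1 with hz | hra2
          · exact g2 z hz
          · by_cases hmem : nb2 ∈ (dfsB d nb (vis.add nb) sub).val.1
            · by_cases hmem2 : nb2 ∈ vis.add nb
              · have he2 : nb2 = nb := by
                  rcases (PySem.Set.mem_add vis nb nb2).1 hmem2 with h | h
                  · exact absurd h hnv2
                  · exact h
                exact g2 z (b5 z (RA_antitone d hvr (he2 ▸ hra2)))
              · exact g2 z (b6 nb2 hmem hmem2 z hra2)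
            · exact g5 nb2 hrest hmem z hra2
        · rcases h1 with ⟨hlowu, rfl⟩
          exact g2 _ (b5 _ (RA.base _ hlowu))
        · rcases h1 with ⟨hlowu, nbs, nb3, hget3, hmem3, hnm3, hra3⟩
          exact g2 z (b5 z (RA.step _ _ _ _ hlowu hget3 hmem3 hnm3 hra3))
    · -- newly marked nodes are fully explored
      intro w hw hnw z hra
      by_cases hmem : w ∈ (dfsB d nb (vis.add nb) sub).val.1
      · by_cases hmem2 : w ∈ vis.add nb
        · have he2 : w = nb := by
            rcases (PySem.Set.mem_add vis nb w).1 hmem2 with h | h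
            · exact absurd h hnw
            · exact h
          have hra2 : RA d (vis.add nb) nb z :=
            RA_antitone d (fun x hx => hvq x (hvr x hx)) (he2 ▸ hra)
          exact g2 z (b5 z hra2)
        · exact g2 z (b6 w hmem hmem2 z (RA_antitone d hvq hra))
      · exact g6 w hw hmem z hra

lemma sorted_eq_of_same_mem (xs ys : List String) (hx : xs.Nodup) (hy : ys.Nodup)
    (h : ∀ z, z ∈ xs ↔ z ∈ ys) :
    PySem.List.sorted xs id = PySem.List.sorted ys id := by
  have hperm : (PySem.List.sorted ys id).Perm xs := by
    refine (PySem.List.sorted_perm ys id false).trans ?_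
    exact (List.perm_ext_iff_of_nodup hy hx).2 (fun a => (h a).symm)
  refine PySem.List.sorted_eq_of_perm_of_pairwise_lt xs (PySem.List.sorted ys id) id hperm ?_
  have hnd : (PySem.List.sorted ys id).Nodup :=
    ((PySem.List.sorted_perm ys id false).nodup_iff).2 hy
  have hp := PySem.List.sorted_pairwise ys id
  exact (hp.and hnd).imp (fun hab => lt_of_le_of_ne hab.1 hab.2)

lemma okS_of_key (d : PySem.Dict String (List String)) (hg : GoodD d) {key : String}
    (hk : key ∈ d.keys) : OkS d key := by
  have : ∃ p ∈ d.items, p.1 = key := by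
    simpa [PySem.Dict.keys] using hk
  rcases this with ⟨p, hp, hpk⟩
  refine ⟨by rw [← hpk]; exact (hg p hp).1, fun _ => ?_⟩
  exact (PySem.Dict.contains_iff_mem_keys d key).2 hk

lemma perkey (d : PySem.Dict String (List String)) (hg : GoodD d) (key : String)
    (hk : key ∈ d.keys) :
    PySem.List.sorted (loopA d (PySem.Set.add PySem.Set.empty key) PySem.Set.empty [key]) id
      = PySem.List.sorted (dfsB d key (PySem.Set.add PySem.Set.empty key) PySem.Set.empty).val.2 id := by
  have hok : OkS d key := okS_of_key d hg hk
  have hA := loopA_master d hg (PySem.Set.add PySem.Set.empty key) PySem.Set.empty [key]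
    (by intro s hs; simp only [List.mem_singleton] at hs; subst hs; exact hok) List.nodup_nil
  have hB := (dfsB_master d hg).1 key (PySem.Set.add PySem.Set.empty key) PySem.Set.empty
    hok List.nodup_nil
  refine sorted_eq_of_same_mem _ _ hA.1 hB.1 ?_
  intro z
  rw [hA.2 z]
  constructor
  · rintro (hz | ⟨s, hs, hra⟩)
    · cases hz
    · rcases List.mem_cons.1 hs with hs | hs
      · subst hs; exact (hB.2.2.2.2.1 z hra)
      · simp at hs
  · intro hz
    rcases hB.2.2.1 z hz with hz2 | hz2
    · cases hz2
    · exact Or.inr ⟨key, List.mem_cons_self, hz2⟩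

-- ===== VERDICT (by name: the statement is the Claim_ definition above) =====
theorem solve_spec : Claim_equal_solve := by
  unfold Claim_equal_solve
  intro N dic _ hpre
  unfold Spec_solve
  dsimp only [solve, solve_alt]
  have hg : GoodD (PySem.Dict.ofList dic) := hpre
  congr 1
  refine PySem.List.foldl_congr_mem _ _ _ _ ?_
  intro acc key hkey
  have hk : key ∈ (PySem.Dict.ofList dic).keys :=
    ((PySem.List.sorted_perm (PySem.Dict.ofList dic).keys id false).mem_iff).1 hkey
  rw [perkey (PySem.Dict.ofList dic) hg key hk]
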